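-- pv_equiv track=rewrite | github.com/devinhunsberger/Black-Jack-Card-Counter | main.py | createShoe
-- ===== SOURCE A (Python) =====
-- deck = ['2', '3', '4', '5', '6', '7', '8', '9', '10', 'Jack', 'Queen', 'King', 'Ace']
--
-- suit = ['Hearts', 'Clubs', 'Diamonds', 'Spades']
--
-- def createShoe(numDecks):
--     fullShoe = []
--     i = 0
--     while i < numDecks:
--         for j in suit:
--             for h in deck:
--                 fullShoe.append([j, h])
--         i += 1
--     return fullShoe
-- ===== SOURCE B (Python) =====
-- deck = ['2', '3', '4', '5', '6', '7', '8', '9', '10', 'Jack', 'Queen', 'King', 'Ace']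
--
-- suit = ['Hearts', 'Clubs', 'Diamonds', 'Spades']
--
-- def _oneDeck():
--     return [[j, h] for j in suit for h in deck]
--
-- def createShoe(numDecks):
--     # binary doubling: n decks = 2*(n//2) decks (the half doubled with fresh copies) + (n % 2) decks
--     if numDecks <= 0:
--         return []
--     shoe = createShoe(numDecks // 2)
--     shoe = shoe + [list(card) for card in shoe]
--     if numDecks % 2:
--         shoe = shoe + _oneDeck()
--     return shoe
-- ===== Notes on version B (the rewrite author's own statement) =====
-- stated objective: alternative
-- what changed: Replaces A's deck-by-deck while-loop over suit x rank by recursive binary doubling: the shoe for n decks is the shoe for half as many decks copy-doubled, plus one extra deck when n is odd (logarithmically many doubling steps instead of n passes).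
import Mathlib
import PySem

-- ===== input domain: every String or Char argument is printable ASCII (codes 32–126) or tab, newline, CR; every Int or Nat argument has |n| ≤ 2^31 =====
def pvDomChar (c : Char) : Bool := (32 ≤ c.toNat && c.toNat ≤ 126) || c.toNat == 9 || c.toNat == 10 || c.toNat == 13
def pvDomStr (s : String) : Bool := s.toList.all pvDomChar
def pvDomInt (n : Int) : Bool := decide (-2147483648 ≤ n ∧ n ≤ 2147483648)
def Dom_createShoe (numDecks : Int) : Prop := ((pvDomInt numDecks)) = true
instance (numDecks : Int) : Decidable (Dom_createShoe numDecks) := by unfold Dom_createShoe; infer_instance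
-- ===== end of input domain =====

-- B builds the shoe by recursive binary doubling instead of A's n passes over suit × rank.

-- ===== PORT A =====
def pyDeck : List String := ["2", "3", "4", "5", "6", "7", "8", "9", "10", "Jack", "Queen", "King", "Ace"]

def pySuit : List String := ["Hearts", "Clubs", "Diamonds", "Spades"]

-- 'while i < numDecks': each pass appends [j, h] for j in suit, h in deck
def createShoeLoop (numDecks i : Int) (fullShoe : List (List String)) : List (List String) :=
  if i < numDecks then
    createShoeLoop numDecks (i + 1)
      (pySuit.foldl (fun acc j => pyDeck.foldl (fun acc' h => acc' ++ [[j, h]]) acc) fullShoe)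
  else fullShoe
termination_by (numDecks - i).toNat
decreasing_by omega

def createShoe (numDecks : Int) : List (List String) :=
  createShoeLoop numDecks 0 []

-- ===== PORT B =====
-- _oneDeck() of Source B
def oneDeck : List (List String) :=
  pySuit.flatMap (fun j => pyDeck.map (fun h => [j, h]))

-- recursive binary doubling; list(card) is a copy, value-identity here
def createShoe_alt (numDecks : Int) : List (List String) :=
  if numDecks ≤ 0 then []
  else
    let shoe := createShoe_alt (PySem.Int.floordiv numDecks 2)
    let shoe2 := shoe ++ shoe.map (fun card => card)
    if PySem.Int.mod numDecks 2 ≠ 0 then shoe2 ++ oneDeck else shoe2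
termination_by numDecks.toNat
decreasing_by
  rw [PySem.Int.floordiv_eq_ediv_of_pos (by omega : (0:Int) < 2)]
  omega

-- ===== PRECONDITION & SPEC =====
def Spec_createShoe (numDecks : Int) (out : List (List String)) : Prop := out = createShoe_alt numDecks
instance (numDecks : Int) (out : List (List String)) : Decidable (Spec_createShoe numDecks out) := by unfold Spec_createShoe; infer_instance

-- ===== CLAIM (what is proved, stated in full; the proofs are below) =====
def Claim_equal_createShoe : Prop := ∀ (numDecks : Int), Dom_createShoe numDecks → Spec_createShoe numDecks (createShoe numDecks)

-- ===== LEMMAS AND PROOFS =====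

-- one pass of A's nested for-loops appends exactly one deck
theorem pass_eq (acc : List (List String)) :
    pySuit.foldl (fun acc j => pyDeck.foldl (fun acc' h => acc' ++ [[j, h]]) acc) acc
      = acc ++ oneDeck := by
  simp only [PySem.List.foldl_append_singleton_eq_map, PySem.List.foldl_append_eq_flatMap]
  rfl

theorem loop_eq (fuel : Nat) (numDecks i : Int) (acc : List (List String))
    (h : (numDecks - i).toNat = fuel) :
    createShoeLoop numDecks i acc = acc ++ (List.replicate fuel oneDeck).flatten := by
  induction fuel generalizing i acc with
  | zero =>
    rw [createShoeLoop]
    have : ¬ i < numDecks := by omega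
    simp [this]
  | succ k ih =>
    rw [createShoeLoop]
    have hlt : i < numDecks := by omega
    rw [if_pos hlt, pass_eq, ih (i + 1) _ (by omega)]
    simp [List.replicate_succ, List.append_assoc]

theorem rep_flatten_add (a b : Nat) :
    (List.replicate a oneDeck).flatten ++ (List.replicate b oneDeck).flatten
      = (List.replicate (a + b) oneDeck).flatten := by
  rw [List.replicate_add, List.flatten_append]

theorem alt_eq (fuel : Nat) (n : Int) (h : n.toNat ≤ fuel) :
    createShoe_alt n = (List.replicate n.toNat oneDeck).flatten := by
  induction fuel generalizing n with
  | zero =>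
    have hn : n ≤ 0 := by omega
    rw [createShoe_alt, if_pos hn]
    have : n.toNat = 0 := by omega
    simp [this]
  | succ k ih =>
    by_cases hn : n ≤ 0
    · rw [createShoe_alt, if_pos hn]
      have : n.toNat = 0 := by omega
      simp [this]
    · rw [createShoe_alt, if_neg hn]
      rw [PySem.Int.floordiv_eq_ediv_of_pos (by omega : (0:Int) < 2),
          PySem.Int.mod_eq_emod_of_pos (by omega : (0:Int) < 2)]
      rw [ih (n / 2) (by omega)]
      simp only [List.map_id_fun', id]
      by_cases hm : n % 2 = 0
      · have hcnt : (n / 2).toNat + (n / 2).toNat = n.toNat := by omega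
        simp only [hm, ne_eq, not_true_eq_false, if_false, rep_flatten_add, hcnt]
      · simp only [ne_eq, hm, not_false_eq_true, if_true]
        rw [rep_flatten_add]
        have hsucc : ∀ a : Nat, (List.replicate a oneDeck).flatten ++ oneDeck
            = (List.replicate (a + 1) oneDeck).flatten := by
          intro a; rw [List.replicate_succ', List.flatten_append]; simp
        have hcnt : (n / 2).toNat + (n / 2).toNat + 1 = n.toNat := by omega
        rw [hsucc, hcnt]

-- ===== VERDICT (by name: the statement is the Claim_ definition above) =====
theorem createShoe_spec : Claim_equal_createShoe := by
  intro n _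
  unfold Spec_createShoe createShoe
  rw [loop_eq ((n - 0).toNat) n 0 [] rfl, alt_eq n.toNat n le_rfl]
  have h0 : (n - 0).toNat = n.toNat := by omega
  rw [h0, List.nil_append]
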